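-- pv_equiv track=rewrite | github.com/COSC-499-W2025/capstone-project-team-19 | src/utils/helpers.py | normalize_pdf_paragraphs
-- ===== SOURCE A (Python) =====
-- SECTION_HEADERS = [
--     "abstract", "introduction", "background", "methods", "methodology",
--     "results", "results and discussion", "discussion", "conclusion",
--     "references", "keywords"
-- ]
--
-- def normalize_pdf_paragraphs(text: str):
--     """
--     Reconstructs paragraphs from messy PDF-extracted text.
--     - Rejoins broken lines.
--     - Detects standard academic headers.
--     - Splits paragraphs cleanly.
--     """
--
--     # Remove double/triple newlines
--     lines = [l.strip() for l in text.split("\n") if l.strip()]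
--
--     paragraphs = []
--     current = []
--
--     def is_header(line):
--         low = line.lower().rstrip(":")
--         return any(low.startswith(h) for h in SECTION_HEADERS)
--
--     for line in lines:
--         # New section header → commit previous paragraph
--         if is_header(line):
--             if current:
--                 paragraphs.append(" ".join(current).strip())
--                 current = []
--             current.append(line)  # header itself becomes a new paragraph start
--             continue
--
--         # Normal continuation → append to the current paragraph
--         current.append(line)
--
--     # Final paragraph
--     if current:
--         paragraphs.append(" ".join(current).strip())
--
--     return paragraphs
-- ===== SOURCE B (Python) =====
-- SECTION_HEADERS = [
--     "abstract", "introduction", "background", "methods", "methodology",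
--     "results", "results and discussion", "discussion", "conclusion",
--     "references", "keywords"
-- ]
--
-- def normalize_pdf_paragraphs(text: str):
--     def is_header(line):
--         low = line.lower().rstrip(":")
--         return any(low.startswith(h) for h in SECTION_HEADERS)
--
--     lines = [l.strip() for l in text.split("\n") if l.strip()]
--
--     # Cut positions: every header index, plus 0 if the text does not start with a header.
--     cuts = [i for i, l in enumerate(lines) if is_header(l)]
--     if not cuts or cuts[0] != 0:
--         cuts = [0] + cuts
--     bounds = cuts + [len(lines)]
--
--     # Paragraphs are the slices between consecutive cut positions.
--     return [" ".join(lines[a:b]).strip() for a, b in zip(bounds, bounds[1:]) if a < b]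
-- ===== Notes on version B (the rewrite author's own statement) =====
-- stated objective: alternative
-- what changed: B replaces A's single-pass buffer-flush loop by an index-based algorithm: it computes the list of header positions over the cleaned lines, normalizes it to a list of cut bounds, and emits each paragraph as the joined slice between consecutive bounds.
import Mathlib
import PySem

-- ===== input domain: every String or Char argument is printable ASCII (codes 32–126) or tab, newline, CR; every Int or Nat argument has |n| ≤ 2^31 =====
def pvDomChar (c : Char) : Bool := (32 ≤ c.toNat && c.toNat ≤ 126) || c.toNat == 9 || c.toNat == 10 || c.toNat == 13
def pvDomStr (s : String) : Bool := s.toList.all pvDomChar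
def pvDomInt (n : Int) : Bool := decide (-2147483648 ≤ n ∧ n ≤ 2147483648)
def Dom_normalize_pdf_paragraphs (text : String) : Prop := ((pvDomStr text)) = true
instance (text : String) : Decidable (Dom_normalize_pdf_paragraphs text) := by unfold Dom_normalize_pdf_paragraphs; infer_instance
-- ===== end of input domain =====

set_option maxHeartbeats 1000000


-- B computes header cut positions over the cleaned lines and emits the joined slices between
-- consecutive bounds, instead of A's buffer-flush loop; same return value (objective: alternative).

-- ===== PORT A =====
def SECTION_HEADERS : List String :=
  ["abstract", "introduction", "background", "methods", "methodology",
   "results", "results and discussion", "discussion", "conclusion",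
   "references", "keywords"]

-- line.rstrip(":") — hand port (PySem has no rstrip-with-chars); exact for the one-char set ":".
def pvRstripColon (s : String) : String :=
  String.ofList (((s.toList.reverse).dropWhile (fun c => c == ':')).reverse)

-- is_header: identical local function in A's and B's Python, so one shared helper
def pvIsHeader (line : String) : Bool :=
  let low := pvRstripColon (PySem.Str.lower line)
  SECTION_HEADERS.any (fun h => PySem.Str.startswith low h)

-- the body of A's for-loop, one iteration on state (paragraphs, current)
def pvStepA (st : List String × List String) (line : String) : List String × List String :=
  let paragraphs := st.1
  let current := st.2
  if pvIsHeader line then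
    let (paragraphs, current) :=
      if current ≠ [] then
        (paragraphs ++ [PySem.Str.strip (PySem.Str.join " " current)], ([] : List String))
      else (paragraphs, current)
    (paragraphs, current ++ [line])
  else
    (paragraphs, current ++ [line])

def normalize_pdf_paragraphs (text : String) : List String :=
  -- text.split("\n"): the separator is the non-empty literal "\n", so split? is some; getD [] is exact
  let lines : List String :=
    ((PySem.Str.split? text "\n").getD []).filterMap
      (fun l => let s := PySem.Str.strip l; if s = "" then none else some s)
  let st := lines.foldl pvStepA ([], [])
  if st.2 ≠ [] then st.1 ++ [PySem.Str.strip (PySem.Str.join " " st.2)] else st.1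

-- ===== PORT B =====
def normalize_pdf_paragraphs_alt (text : String) : List String :=
  let lines : List String :=
    ((PySem.Str.split? text "\n").getD []).filterMap
      (fun l => let s := PySem.Str.strip l; if s = "" then none else some s)
  -- cuts = [i for i, l in enumerate(lines) if is_header(l)]
  let cuts : List Int :=
    (PySem.List.enumerate lines).filterMap
      (fun p => if pvIsHeader p.2 then some p.1 else none)
  -- if not cuts or cuts[0] != 0: cuts = [0] + cuts   (cuts[0] only read when cuts is non-empty)
  let cuts : List Int := if cuts = [] ∨ cuts.headD 0 ≠ 0 then 0 :: cuts else cuts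
  let bounds : List Int := cuts ++ [(lines.length : Int)]
  -- [" ".join(lines[a:b]).strip() for a, b in zip(bounds, bounds[1:]) if a < b]; bounds[1:] = drop 1
  (bounds.zip (bounds.drop 1)).filterMap
    (fun p => if p.1 < p.2 then
        some (PySem.Str.strip (PySem.Str.join " " (PySem.List.slice lines (some p.1) (some p.2))))
      else none)

-- ===== PRECONDITION & SPEC =====
def Spec_normalize_pdf_paragraphs (text : String) (out : List String) : Prop := out = normalize_pdf_paragraphs_alt text
instance (text : String) (out : List String) : Decidable (Spec_normalize_pdf_paragraphs text out) := by unfold Spec_normalize_pdf_paragraphs; infer_instance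

-- ===== CLAIM (what is proved, stated in full; the proofs are below) =====
def Claim_equal_normalize_pdf_paragraphs : Prop := ∀ (text : String), Dom_normalize_pdf_paragraphs text → Spec_normalize_pdf_paragraphs text (normalize_pdf_paragraphs text)

-- ===== LEMMAS AND PROOFS =====

def pvJoin (seg : List String) : String := PySem.Str.strip (PySem.Str.join " " seg)

-- the common segmentation both programs compute (generic in the header predicate,
-- so proofs never unfold pvIsHeader): runs starting at each header
def pvSeg (hdr : String → Bool) : List String → List (List String)
  | [] => []
  | l :: ls =>
      (l :: ls.takeWhile (fun x => !hdr x)) :: pvSeg hdr (ls.dropWhile (fun x => !hdr x))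
termination_by ls => ls.length
decreasing_by
  exact Nat.lt_succ_of_le (List.length_dropWhile_le _ _)

@[simp] lemma pvSeg_nil (hdr : String → Bool) : pvSeg hdr [] = [] := by rw [pvSeg]

@[simp] lemma pvSeg_cons (hdr : String → Bool) (l : String) (ls : List String) :
    pvSeg hdr (l :: ls)
      = (l :: ls.takeWhile (fun x => !hdr x)) :: pvSeg hdr (ls.dropWhile (fun x => !hdr x)) := by
  rw [pvSeg]

def pvFinalA (st : List String × List String) : List String :=
  if st.2 ≠ [] then st.1 ++ [pvJoin st.2] else st.1

-- A's fold computes the joined segmentation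
lemma foldA_seg (ls : List String) : ∀ (p c : List String),
    pvFinalA (ls.foldl pvStepA (p, c))
      = p ++ (if c = [] then (pvSeg pvIsHeader ls).map pvJoin
              else ((c ++ ls.takeWhile (fun x => !pvIsHeader x))
                      :: pvSeg pvIsHeader (ls.dropWhile (fun x => !pvIsHeader x))).map pvJoin) := by
  induction ls with
  | nil =>
    intro p c
    by_cases hc : c = [] <;> simp [pvFinalA, hc]
  | cons l ls ih =>
    intro p c
    by_cases hc : c = []
    · subst hc
      by_cases hh : pvIsHeader l
      · rw [List.foldl_cons, show pvStepA (p, []) l = (p, [l]) by simp [pvStepA, hh], ih]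
        simp
      · rw [List.foldl_cons, show pvStepA (p, []) l = (p, [l]) by simp [pvStepA, hh], ih]
        simp
    · by_cases hh : pvIsHeader l
      · rw [List.foldl_cons,
          show pvStepA (p, c) l = (p ++ [pvJoin c], [l]) by simp [pvStepA, hh, hc, pvJoin], ih]
        simp [hh, hc]
      · rw [List.foldl_cons,
          show pvStepA (p, c) l = (p, c ++ [l]) by simp [pvStepA, hh], ih]
        simp [hh, hc]

-- header positions as Nats (B's cuts list, index-shifted)
def pvCutsN (hdr : String → Bool) : List String → List Nat
  | [] => []
  | l :: ls => (if hdr l then [0] else []) ++ (pvCutsN hdr ls).map (· + 1)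

lemma enum_filter_cuts (ls : List String) : ∀ (s : Int),
    (PySem.List.enumerate ls s).filterMap
        (fun p => if pvIsHeader p.2 then some p.1 else none)
      = (pvCutsN pvIsHeader ls).map (fun (n : Nat) => s + (n : Int)) := by
  induction ls with
  | nil => intro s; simp [PySem.List.enumerate_nil, pvCutsN]
  | cons l ls ih =>
    intro s
    rw [PySem.List.enumerate_cons]
    by_cases hh : pvIsHeader l
    · rw [List.filterMap_cons_some (b := s) (by simp [hh]), ih (s + 1)]
      simp only [pvCutsN, hh, if_true, List.singleton_append, List.map_cons, List.map_map,
        Function.comp_def, Nat.cast_zero]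
      exact List.cons_eq_cons.mpr ⟨by ring, List.map_congr_left fun n _ => by push_cast; ring⟩
    · rw [List.filterMap_cons_none (by simp [hh]), ih (s + 1)]
      simp only [pvCutsN, hh, Bool.false_eq_true, if_false, List.nil_append, List.map_map,
        Function.comp_def]
      exact List.map_congr_left fun n _ => by push_cast; ring

lemma cutsN_append (hdr : String → Bool) (xs ys : List String) :
    pvCutsN hdr (xs ++ ys) = pvCutsN hdr xs ++ (pvCutsN hdr ys).map (· + xs.length) := by
  induction xs with
  | nil => simp [pvCutsN]
  | cons x xs ih =>
    simp only [List.cons_append, pvCutsN, ih, List.map_append, List.map_map, Function.comp_def,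
      List.append_assoc, List.length_cons]
    refine congrArg _ (congrArg₂ _ ?_ ?_)
    · exact List.map_congr_left fun n _ => by omega
    · exact List.map_congr_left fun n _ => by omega

lemma cutsN_nil_of_no_header (hdr : String → Bool) (xs : List String)
    (h : ∀ x ∈ xs, hdr x = false) : pvCutsN hdr xs = [] := by
  induction xs with
  | nil => rfl
  | cons x xs ih =>
    simp [pvCutsN, h x (by simp), ih (fun y hy => h y (by simp [hy]))]

-- the slices between consecutive bounds
def pvSlices (full : List String) : List Nat → List (List String)
  | [] => []
  | [_] => []
  | a :: b :: bs =>
      (if a < b then [(full.drop a).take (b - a)] else []) ++ pvSlices full (b :: bs)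

@[simp] lemma pvSlices_nil (full : List String) : pvSlices full [] = [] := rfl
@[simp] lemma pvSlices_single (full : List String) (a : Nat) : pvSlices full [a] = [] := rfl
lemma pvSlices_cons2 (full : List String) (a b : Nat) (bs : List Nat) :
    pvSlices full (a :: b :: bs)
      = (if a < b then [(full.drop a).take (b - a)] else []) ++ pvSlices full (b :: bs) := rfl

-- the cut-bound slices ARE the segmentation
lemma slices_seg (hdr : String → Bool) : ∀ (m : Nat) (rest : List String), rest.length ≤ m →
    ∀ (l : String) (k : Nat) (full : List String), full.drop k = l :: rest →
    pvSlices full (k :: ((pvCutsN hdr rest).map (· + (k + 1))) ++ [full.length])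
      = pvSeg hdr (l :: rest) := by
  intro m
  induction m with
  | zero =>
    intro rest hrest l k full hdrop
    have h0 : rest = [] := List.length_eq_zero_iff.mp (Nat.le_zero.mp hrest)
    subst h0
    have hlen := congrArg List.length hdrop
    simp only [List.length_drop, List.length_cons, List.length_nil] at hlen
    have hk : k < full.length := by omega
    simp only [pvCutsN, List.map_nil, List.nil_append, List.cons_append]
    rw [pvSlices_cons2, if_pos hk, hdrop, show full.length - k = 1 by omega]
    simp
  | succ m ih =>
    intro rest hrest l k full hdrop
    have hlenfact := congrArg List.length hdrop
    simp only [List.length_drop, List.length_cons] at hlenfact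
    have hk : k < full.length := by omega
    have hrestsplit : rest
        = rest.takeWhile (fun x => !hdr x) ++ rest.dropWhile (fun x => !hdr x) :=
      (List.takeWhile_append_dropWhile).symm
    have htnh : ∀ x ∈ rest.takeWhile (fun x => !hdr x), hdr x = false := by
      intro x hx
      simpa using List.mem_takeWhile_imp hx
    have hcuts : pvCutsN hdr rest
        = (pvCutsN hdr (rest.dropWhile (fun x => !hdr x))).map
            (· + (rest.takeWhile (fun x => !hdr x)).length) := by
      conv_lhs => rw [hrestsplit]
      rw [cutsN_append, cutsN_nil_of_no_header hdr _ htnh]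
      simp
    cases hdm : rest.dropWhile (fun x => !hdr x) with
    | nil =>
      have htr : rest.takeWhile (fun x => !hdr x) = rest := by
        conv_rhs => rw [hrestsplit]
        rw [hdm, List.append_nil]
      rw [hcuts, hdm]
      simp only [pvCutsN, List.map_nil, List.nil_append, List.cons_append]
      rw [pvSlices_cons2, if_pos hk, hdrop, show full.length - k = rest.length + 1 by omega]
      rw [pvSeg_cons, htr, hdm]
      simp [List.take_of_length_le]
    | cons h d' =>
      have hhh : hdr h = true := by
        have hne : rest.dropWhile (fun x => !hdr x) ≠ [] := by rw [hdm]; simp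
        have := List.head_dropWhile_not (fun x => !hdr x) hne
        simp only [hdm, List.head_cons] at this
        simpa using this
      set t := rest.takeWhile (fun x => !hdr x) with ht
      have hcuts2 : pvCutsN hdr rest = t.length :: (pvCutsN hdr d').map (· + 1 + t.length) := by
        rw [hcuts, hdm]
        simp [pvCutsN, hhh, List.map_map, Function.comp_def]
      have hdropk' : full.drop (k + 1 + t.length) = h :: d' := by
        have h1 : full.drop (k + 1 + t.length) = (full.drop k).drop (1 + t.length) := by
          rw [List.drop_drop]; congr 1; omega
        rw [h1, hdrop, show 1 + t.length = t.length + 1 by omega]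
        simp only [List.drop_succ_cons]
        conv_lhs => rw [hrestsplit, hdm]
        exact List.drop_left
      have hlt : rest.length = t.length + 1 + d'.length := by
        conv_lhs => rw [hrestsplit, hdm]
        simp; omega
      have hrec := ih d' (by omega) h (k + 1 + t.length) full hdropk'
      rw [List.cons_append] at hrec
      rw [hcuts2]
      simp only [List.map_cons, List.map_map, Function.comp_def, List.cons_append]
      rw [pvSlices_cons2, if_pos (by omega : k < t.length + (k + 1))]
      have hfirst : (full.drop k).take (t.length + (k + 1) - k) = l :: t := by
        rw [hdrop, show t.length + (k + 1) - k = t.length + 1 by omega]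
        rw [show t.length + 1 = (l :: t).length by simp]
        conv_lhs => rw [hrestsplit, hdm]
        exact List.take_left
      rw [hfirst]
      have hmapeq : (pvCutsN hdr d').map (fun n => n + 1 + t.length + (k + 1))
          = (pvCutsN hdr d').map (· + (k + 1 + t.length + 1)) :=
        List.map_congr_left (fun n _ => by omega)
      rw [show t.length + (k + 1) = k + 1 + t.length by omega, hmapeq, hrec]
      conv_rhs => rw [pvSeg_cons, hdm]
      rw [← ht]
      simp

-- the Nat bounds list B effectively computes
def pvBoundsN (lines : List String) : List Nat :=
  0 :: (match lines with
        | [] => []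
        | _ :: rest => (pvCutsN pvIsHeader rest).map (· + 1)) ++ [lines.length]

-- B's normalized Int bounds are the cast Nat bounds
lemma bounds_form (lines : List String) :
    (if (pvCutsN pvIsHeader lines).map (fun (n : Nat) => (0 : Int) + (n : Int)) = []
        ∨ ((pvCutsN pvIsHeader lines).map (fun (n : Nat) => (0 : Int) + (n : Int))).headD 0 ≠ 0 then
       0 :: (pvCutsN pvIsHeader lines).map (fun (n : Nat) => (0 : Int) + (n : Int))
     else (pvCutsN pvIsHeader lines).map (fun (n : Nat) => (0 : Int) + (n : Int)))
      ++ [(lines.length : Int)]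
    = (pvBoundsN lines).map (fun (n : Nat) => (n : Int)) := by
  cases lines with
  | nil => simp [pvCutsN, pvBoundsN]
  | cons l rest =>
    by_cases hh : pvIsHeader l
    · rw [show pvCutsN pvIsHeader (l :: rest) = 0 :: (pvCutsN pvIsHeader rest).map (· + 1) by simp [pvCutsN, hh]]
      rw [if_neg (by simp)]
      simp only [pvBoundsN, List.map_cons, List.map_append, List.map_map, Function.comp_def,
        List.cons_append, Nat.cast_zero, List.map_nil]
      refine List.cons_eq_cons.mpr ⟨by ring, ?_⟩
      exact congrArg₂ _ (List.map_congr_left fun n _ => by push_cast; ring) rfl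
    · rw [show pvCutsN pvIsHeader (l :: rest) = (pvCutsN pvIsHeader rest).map (· + 1) by simp [pvCutsN, hh]]
      have hif : (if ((pvCutsN pvIsHeader rest).map (· + 1)).map (fun (n : Nat) => (0 : Int) + (n : Int)) = []
          ∨ (((pvCutsN pvIsHeader rest).map (· + 1)).map (fun (n : Nat) => (0 : Int) + (n : Int))).headD 0 ≠ 0 then
            0 :: ((pvCutsN pvIsHeader rest).map (· + 1)).map (fun (n : Nat) => (0 : Int) + (n : Int))
          else ((pvCutsN pvIsHeader rest).map (· + 1)).map (fun (n : Nat) => (0 : Int) + (n : Int)))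
          = 0 :: ((pvCutsN pvIsHeader rest).map (· + 1)).map (fun (n : Nat) => (0 : Int) + (n : Int)) := by
        cases hc : pvCutsN pvIsHeader rest with
        | nil => simp
        | cons c cs =>
          rw [if_pos (Or.inr (by simp only [List.map_cons, List.headD_cons]; intro hcon; omega))]
      rw [hif]
      simp only [pvBoundsN, List.map_cons, List.map_append, List.map_map, Function.comp_def,
        List.cons_append, Nat.cast_zero, List.map_nil]
      refine List.cons_eq_cons.mpr ⟨rfl, ?_⟩
      exact congrArg₂ _ (List.map_congr_left fun n _ => by push_cast; ring) rfl

-- B's zip/filterMap over the cast bounds is the pvJoin-mapped pvSlices over the Nat bounds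
lemma zip_filterMap_slices (lines : List String) : ∀ (bs : List Nat),
    (((bs.map (fun (n : Nat) => (n : Int))).zip ((bs.map (fun (n : Nat) => (n : Int))).drop 1)).filterMap
      (fun p => if p.1 < p.2 then
          some (PySem.Str.strip (PySem.Str.join " " (PySem.List.slice lines (some p.1) (some p.2))))
        else none))
      = (pvSlices lines bs).map pvJoin := by
  intro bs
  induction bs with
  | nil => simp [pvSlices]
  | cons a bs ih =>
    cases bs with
    | nil => simp [pvSlices]
    | cons b bs' =>
      simp only [List.map_cons, List.drop_succ_cons, List.drop_zero, List.zip_cons_cons] at ih ⊢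
      rw [List.filterMap_cons]
      by_cases hab : a < b
      · rw [if_pos (show ((a : Int), (b : Int)).1 < ((a : Int), (b : Int)).2 by simpa using hab)]
        rw [ih, PySem.List.slice_toNat lines (Int.natCast_nonneg a) (Int.natCast_nonneg b)]
        simp only [Int.toNat_natCast]
        rw [pvSlices_cons2, if_pos hab]
        simp [pvJoin]
      · rw [if_neg (show ¬ ((a : Int), (b : Int)).1 < ((a : Int), (b : Int)).2 by simpa using hab)]
        rw [ih, pvSlices_cons2, if_neg hab]
        simp

-- the bounds-slices are the segmentation
lemma slices_bounds (lines : List String) :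
    pvSlices lines (pvBoundsN lines) = pvSeg pvIsHeader lines := by
  cases lines with
  | nil => simp [pvBoundsN, pvSlices_cons2]
  | cons l rest =>
    have := slices_seg pvIsHeader rest.length rest le_rfl l 0 (l :: rest) (by simp)
    simp only [pvBoundsN]
    rw [show (pvCutsN pvIsHeader rest).map (· + 1) = (pvCutsN pvIsHeader rest).map (· + (0 + 1)) by simp]
    exact this

-- ===== VERDICT (by name: the statement is the Claim_ definition above) =====
theorem normalize_pdf_paragraphs_spec : Claim_equal_normalize_pdf_paragraphs := by
  intro text _
  unfold Spec_normalize_pdf_paragraphs normalize_pdf_paragraphs normalize_pdf_paragraphs_alt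
  simp only []
  set lines : List String :=
    ((PySem.Str.split? text "\n").getD []).filterMap
      (fun l => let s := PySem.Str.strip l; if s = "" then none else some s) with hlines
  have hA : (if (lines.foldl pvStepA ([], [])).2 ≠ [] then
        (lines.foldl pvStepA ([], [])).1 ++ [PySem.Str.strip (PySem.Str.join " " (lines.foldl pvStepA ([], [])).2)]
      else (lines.foldl pvStepA ([], [])).1) = (pvSeg pvIsHeader lines).map pvJoin := by
    have := foldA_seg lines [] []
    simpa [pvFinalA, pvJoin] using this
  rw [hA, enum_filter_cuts lines 0, bounds_form lines, zip_filterMap_slices lines,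
    slices_bounds lines]
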